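-- pv_equiv track=rewrite | github.com/aflynt/aoc | day_22/lib.py | mk_grid
-- ===== SOURCE A (Python) =====
-- def mk_grid(board):
--
--     NC_max = 0
--     for row in board:
--         NC_max = max(NC_max, len(row))
--
--     NR = len(board)
--     NC = NC_max
--
--     grid = []
--     for _ in range(NR):
--         grid.append([ ' ' for _ in range(NC) ])
--
--     for irow, row in enumerate(board):
--         for icol, col in enumerate(row):
--             grid[irow][icol] = col
--
--     return grid
-- ===== SOURCE B (Python) =====
-- def mk_grid(board):
--     grid = [[] for _ in board]
--     i = 0
--     while any(i < len(row) for row in board):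
--         for g, row in zip(grid, board):
--             g.append(row[i] if i < len(row) else ' ')
--         i += 1
--     return grid
-- ===== Notes on version B (the rewrite author's own statement) =====
-- stated objective: alternative
-- what changed: B never computes the maximum width or any padding counts: it peels the board column by column, appending to each output row `row[i]` (or a space when row i is exhausted) until no row has an i-th character, instead of A's max-then-prefill-spaces-then-overwrite-cells scheme.
import Mathlib
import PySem

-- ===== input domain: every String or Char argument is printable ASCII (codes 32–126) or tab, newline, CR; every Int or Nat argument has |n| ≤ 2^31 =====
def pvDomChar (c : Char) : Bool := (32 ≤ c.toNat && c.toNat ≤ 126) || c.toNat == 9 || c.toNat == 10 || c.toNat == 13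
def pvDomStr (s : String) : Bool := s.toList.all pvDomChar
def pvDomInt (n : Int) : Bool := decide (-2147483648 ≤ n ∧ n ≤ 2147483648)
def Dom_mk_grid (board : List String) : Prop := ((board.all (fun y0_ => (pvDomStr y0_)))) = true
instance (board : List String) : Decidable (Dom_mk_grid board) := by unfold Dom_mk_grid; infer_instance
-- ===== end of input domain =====

-- B peels the board column by column (no max-width computation, no space prefill) instead of A's fill-then-overwrite scheme (objective: alternative).


-- ===== PORT A =====
-- fill-then-overwrite: build an NR×NC grid of spaces, then set grid[irow][icol] for each cell;
-- the two 'enumerate' loops are folds carrying the running index as explicit state.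
def mk_grid (board : List String) : List (List String) :=
  let NC_max : Nat := board.foldl (fun acc row => max acc row.toList.length) 0
  let NR := board.length
  let NC := NC_max
  let grid : List (List String) :=
    (List.range NR).foldl (fun g _ => g ++ [(List.range NC).map (fun _ => " ")]) []
  let grid :=
    (board.foldl (fun (st : Nat × List (List String)) row =>
      (st.1 + 1,
        (row.toList.foldl (fun (st2 : Nat × List (List String)) c =>
          (st2.1 + 1, st2.2.modify st.1 (fun r => r.set st2.1 (String.ofList [c]))))
          (0, st.2)).2))
      (0, grid)).2
  grid

-- ===== PORT B =====
-- (the next two lemmas exist only to justify the termination of B's while loop)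
-- the running max only grows
theorem pv_foldl_max_mono (t : List String) (a : Nat) :
    a ≤ t.foldl (fun acc r => max acc r.toList.length) a := by
  induction t generalizing a with
  | nil => simp
  | cons b t ih => exact le_trans (le_max_left _ _) (ih _)

-- every row length is bounded by the foldl max
theorem pv_le_foldl_max (board : List String) (row : String) (hm : row ∈ board) (a : Nat) :
    row.toList.length ≤ board.foldl (fun acc r => max acc r.toList.length) a := by
  induction board generalizing a with
  | nil => cases hm
  | cons b t ih =>
    rcases List.mem_cons.mp hm with h | h
    · subst h
      exact le_trans (le_max_right a _) (pv_foldl_max_mono t _)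
    · exact ih h _

-- if some row still has an i-th character, i is below the max width (termination of the while loop)
theorem pv_any_lt_max (board : List String) (i : Nat)
    (h : board.any (fun row => decide (i < row.toList.length)) = true) :
    i < board.foldl (fun acc row => max acc row.toList.length) 0 := by
  obtain ⟨row, hmem, hlt⟩ := List.any_eq_true.mp h
  exact lt_of_lt_of_le (of_decide_eq_true hlt) (pv_le_foldl_max board row hmem 0)

-- B's while loop: at step i, append to every grid row its i-th column entry (row[i] or a space)
def mkGridLoop (board : List String) (grid : List (List String)) (i : Nat) : List (List String) :=
  if h : board.any (fun row => decide (i < row.toList.length)) then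
    mkGridLoop board
      (List.zipWith (fun g row =>
        g ++ [if hi : i < row.toList.length then String.ofList [row.toList[i]] else " "]) grid board)
      (i + 1)
  else grid
termination_by board.foldl (fun acc row => max acc row.toList.length) 0 - i
decreasing_by have := pv_any_lt_max board i h; omega

def mk_grid_alt (board : List String) : List (List String) :=
  mkGridLoop board (board.map (fun _ => ([] : List String))) 0

-- ===== PRECONDITION & SPEC =====
def Spec_mk_grid (board : List String) (out : List (List String)) : Prop := out = mk_grid_alt board
instance (board : List String) (out : List (List String)) : Decidable (Spec_mk_grid board out) := by unfold Spec_mk_grid; infer_instance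

-- ===== CLAIM (what is proved, stated in full; the proofs are below) =====
def Claim_equal_mk_grid : Prop := ∀ (board : List String), Dom_mk_grid board → Spec_mk_grid board (mk_grid board)

-- ===== LEMMAS AND PROOFS =====

-- ---- A-side lemmas (fill-then-overwrite characterisation) ----

-- the space-fill loop produces NR copies of the space row
theorem pv_fill_replicate (x : List String) (init : List (List String)) (n : Nat) :
    (List.range n).foldl (fun g _ => g ++ [x]) init = init ++ List.replicate n x := by
  induction n generalizing init with
  | zero => simp
  | succ m ih =>
    rw [List.range_succ, List.foldl_append]
    simp [ih, List.replicate_succ']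

-- modifying the same index repeatedly composes
theorem pv_modify_modify {α : Type} (l : List α) (i : Nat) (f g : α → α) :
    (l.modify i f).modify i g = l.modify i (fun a => g (f a)) := by
  induction l generalizing i with
  | nil => simp
  | cons a t ih =>
    cases i with
    | zero => simp [List.modify_zero_cons]
    | succ j => simp [List.modify_succ_cons, ih]

-- modify at the length of the left part hits the head of the right part
theorem pv_modify_append {α : Type} (done : List α) (x : α) (rest : List α) (f : α → α) :
    (done ++ x :: rest).modify done.length f = done ++ f x :: rest := by
  induction done with
  | nil => simp [List.modify_zero_cons]
  | cons a t ih => simp [List.modify_succ_cons, ih]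

-- modifying with the identity is the identity
theorem pv_modify_id {α : Type} (l : List α) (i : Nat) : l.modify i (fun a => a) = l := by
  induction l generalizing i with
  | nil => simp
  | cons a t ih =>
    cases i with
    | zero => simp [List.modify_zero_cons]
    | succ j => simp [List.modify_succ_cons, ih]

-- the inner cell loop only modifies row irow, with the per-row set loop composed inside
theorem pv_inner_modify (cs : List Char) (irow : Nat) (j : Nat) (g : List (List String)) :
    (cs.foldl (fun (st2 : Nat × List (List String)) c =>
        (st2.1 + 1, st2.2.modify irow (fun r => r.set st2.1 (String.ofList [c])))) (j, g)).2
    = g.modify irow (fun r =>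
        (cs.foldl (fun (st2 : Nat × List String) c =>
          (st2.1 + 1, st2.2.set st2.1 (String.ofList [c]))) (j, r)).2) := by
  induction cs generalizing j g with
  | nil => exact (pv_modify_id g irow).symm
  | cons c cs' ih =>
    simp only [List.foldl_cons, ih, pv_modify_modify]

-- the per-row set loop overwrites positions j..j+len-1
theorem pv_setrun (cs : List Char) (j : Nat) (r : List String) (h : j + cs.length ≤ r.length) :
    (cs.foldl (fun (st2 : Nat × List String) c =>
        (st2.1 + 1, st2.2.set st2.1 (String.ofList [c]))) (j, r)).2
    = r.take j ++ cs.map (fun c => String.ofList [c]) ++ r.drop (j + cs.length) := by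
  induction cs generalizing j r with
  | nil => simp [List.take_append_drop]
  | cons c cs' ih =>
    simp only [List.foldl_cons, List.map_cons, List.length_cons] at h ⊢
    have hj : j < r.length := by omega
    rw [ih (j + 1) _ (by simp only [List.length_set]; omega)]
    have htake : (r.set j (String.ofList [c])).take (j + 1)
        = r.take j ++ [String.ofList [c]] := by
      rw [List.take_add_one, List.take_set,
        List.set_eq_of_length_le (by simp [List.length_take]),
        List.getElem?_set_self (by simp [hj])]
      simp
    have hdrop : (r.set j (String.ofList [c])).drop (j + 1 + cs'.length)
        = r.drop (j + 1 + cs'.length) := by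
      rw [List.drop_set, if_pos (by omega)]
    have harith : j + 1 + cs'.length = j + (cs'.length + 1) := by omega
    rw [htake, hdrop, harith]
    simp [List.append_assoc]

-- the outer row loop maps each remaining space row to its padded row
theorem pv_outer (NC : Nat) (bs : List String) (done : List (List String))
    (hlen : ∀ row ∈ bs, row.toList.length ≤ NC) :
    (bs.foldl (fun (st : Nat × List (List String)) row =>
      (st.1 + 1,
        (row.toList.foldl (fun (st2 : Nat × List (List String)) c =>
          (st2.1 + 1, st2.2.modify st.1 (fun r => r.set st2.1 (String.ofList [c]))))
          (0, st.2)).2))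
      (done.length, done ++ List.replicate bs.length (List.replicate NC " "))).2
    = done ++ bs.map (fun row =>
        row.toList.map (fun c => String.ofList [c]) ++ List.replicate (NC - row.toList.length) " ") := by
  induction bs generalizing done with
  | nil => simp
  | cons row bs' ih =>
    simp only [List.foldl_cons, List.length_cons, List.replicate_succ, List.map_cons]
    rw [pv_inner_modify, pv_modify_append]
    rw [pv_setrun _ 0 _ (by simpa using hlen row (by simp))]
    have hdrop : (List.replicate NC " ").drop (0 + row.toList.length)
        = List.replicate (NC - row.toList.length) (" " : String) := by
      simp [List.drop_replicate]
    rw [hdrop]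
    have := ih (done ++ [row.toList.map (fun c => String.ofList [c]) ++ List.replicate (NC - row.toList.length) " "])
      (fun r hr => hlen r (by simp [hr]))
    simp only [List.length_append, List.length_cons, List.length_nil] at this ⊢
    simpa [List.append_assoc] using this

-- ---- B-side lemmas (column-peeling loop characterisation) ----

-- the columns the loop still has to emit for one row, starting from column i, width M
def pvPad (M i : Nat) (row : String) : List String :=
  (row.toList.drop i).map (fun c => String.ofList [c]) ++ List.replicate (M - max i row.toList.length) " "

-- if all remaining lengths are ≤ i, the foldl max is ≤ max a i
theorem pv_foldl_max_le (t : List String) (i : Nat) (hall : ∀ r ∈ t, r.toList.length ≤ i) (a : Nat)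
    (ha : a ≤ i) : t.foldl (fun acc r => max acc r.toList.length) a ≤ i := by
  induction t generalizing a with
  | nil => simpa using ha
  | cons b t ih =>
    exact ih (fun r hr => hall r (List.mem_cons_of_mem _ hr))
      _ (max_le ha (hall b (List.mem_cons_self)))

theorem pv_zipWith_self {α β : Type} (a : List α) (b : List β) (h : a.length = b.length) :
    List.zipWith (fun x _ => x) a b = a := by
  induction a generalizing b with
  | nil => simp
  | cons x a ih =>
    cases b with
    | nil => simp at h
    | cons y b => simp_all

theorem pv_zipWith_zipWith {α β γ δ : Type} (f : γ → β → δ) (g : α → β → γ)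
    (a : List α) (b : List β) :
    List.zipWith f (List.zipWith g a b) b = List.zipWith (fun x y => f (g x y) y) a b := by
  induction a generalizing b with
  | nil => simp
  | cons x a ih =>
    cases b with
    | nil => simp
    | cons y b => simp [ih]

-- zipWith only looks at the function's values on members of the second list
theorem pv_zipWith_congr {α β γ : Type} (f f' : α → β → γ) (a : List α) (b : List β)
    (h : ∀ y ∈ b, ∀ x, f x y = f' x y) :
    List.zipWith f a b = List.zipWith f' a b := by
  induction a generalizing b with
  | nil => simp
  | cons x a ih =>
    cases b with
    | nil => simp
    | cons y b =>
      simp only [List.zipWith_cons_cons, h y (List.mem_cons_self) x]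
      rw [ih b (fun z hz x' => h z (List.mem_cons_of_mem _ hz) x')]

-- one column step absorbs into pvPad
theorem pv_pad_step (M i : Nat) (hiM : i < M) (row : String) :
    (if hi : i < row.toList.length then String.ofList [row.toList[i]] else " ")
      :: pvPad M (i + 1) row = pvPad M i row := by
  by_cases hi : i < row.toList.length
  · rw [dif_pos hi]
    unfold pvPad
    rw [Nat.max_eq_right (le_of_lt hi), Nat.max_eq_right hi]
    have hcons : (row.toList.drop i).map (fun c => String.ofList [c])
        = String.ofList [row.toList[i]] :: (row.toList.drop (i + 1)).map (fun c => String.ofList [c]) := by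
      rw [List.drop_eq_getElem_cons hi, List.map_cons]
    rw [hcons, List.cons_append]
  · rw [dif_neg hi]
    have hi' := Nat.le_of_not_lt hi
    unfold pvPad
    rw [List.drop_eq_nil_of_le hi', List.drop_eq_nil_of_le (le_trans hi' (Nat.le_succ i)),
      Nat.max_eq_left hi', Nat.max_eq_left (le_trans hi' (Nat.le_succ i)),
      show M - i = (M - (i + 1)) + 1 by omega, List.replicate_succ]
    simp

-- a row already exhausted at column i contributes nothing more
theorem pv_pad_nil (M i : Nat) (row : String) (h1 : row.toList.length ≤ i) (h2 : M ≤ i) :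
    pvPad M i row = [] := by
  unfold pvPad
  rw [List.drop_eq_nil_of_le h1, Nat.sub_eq_zero_of_le (le_trans h2 (le_max_left _ _))]
  simp

-- main loop invariant: the loop appends pvPad M i to each grid row
theorem pv_loop (board : List String) (n : Nat) :
    ∀ i grid, board.foldl (fun acc row => max acc row.toList.length) 0 - i ≤ n →
      grid.length = board.length →
      mkGridLoop board grid i =
        List.zipWith (fun g row =>
          g ++ pvPad (board.foldl (fun acc row => max acc row.toList.length) 0) i row) grid board := by
  induction n with
  | zero =>
    intro i grid hn hg
    have hM : board.foldl (fun acc row => max acc row.toList.length) 0 ≤ i := by omega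
    have hc : ¬ board.any (fun row => decide (i < row.toList.length)) = true := by
      intro h; exact absurd (pv_any_lt_max board i h) (by omega)
    rw [mkGridLoop, dif_neg hc]
    rw [pv_zipWith_congr _ (fun x _ => x) grid board
      (fun row hr x => by
        have hle : row.toList.length ≤ i :=
          le_trans (pv_le_foldl_max board row hr 0) hM
        rw [pv_pad_nil _ i row hle hM, List.append_nil])]
    exact (pv_zipWith_self grid board hg).symm
  | succ n ih =>
    intro i grid hn hg
    by_cases hc : board.any (fun row => decide (i < row.toList.length)) = true
    · have hiM : i < board.foldl (fun acc row => max acc row.toList.length) 0 :=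
        pv_any_lt_max board i hc
      rw [mkGridLoop, dif_pos hc]
      rw [ih (i + 1) _ (by omega) (by rw [List.length_zipWith, hg]; omega)]
      rw [pv_zipWith_zipWith]
      exact pv_zipWith_congr _ _ _ board
        (fun row _ g => by
          rw [List.append_assoc, List.singleton_append, pv_pad_step _ i hiM row])
    · have hM : board.foldl (fun acc row => max acc row.toList.length) 0 ≤ i := by
        apply pv_foldl_max_le _ i _ 0 (Nat.zero_le i)
        intro r hr
        by_contra hlt
        exact hc (List.any_eq_true.mpr ⟨r, hr, decide_eq_true (by omega)⟩)
      rw [mkGridLoop, dif_neg hc]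
      rw [pv_zipWith_congr _ (fun x _ => x) grid board
        (fun row hr x => by
          have hle : row.toList.length ≤ i :=
            le_trans (pv_le_foldl_max board row hr 0) hM
          rw [pv_pad_nil _ i row hle hM, List.append_nil])]
      exact (pv_zipWith_self grid board hg).symm

theorem pv_zipWith_map_nil {β γ : Type} (f : β → List γ) (b : List β) :
    List.zipWith (fun g row => g ++ f row) (b.map (fun _ => ([] : List γ))) b = b.map f := by
  induction b with
  | nil => simp
  | cons y b ih => simp only [List.map_cons, List.zipWith_cons_cons, List.nil_append, ih]

-- ===== VERDICT (by name: the statement is the Claim_ definition above) =====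
theorem mk_grid_spec : Claim_equal_mk_grid := by
  intro board _
  unfold Spec_mk_grid
  -- A's side: padded-row map
  have hA : mk_grid board = board.map (fun row =>
      row.toList.map (fun c => String.ofList [c]) ++
        List.replicate ((board.foldl (fun acc row => max acc row.toList.length) 0) - row.toList.length) " ") := by
    unfold mk_grid
    simp only
    rw [pv_fill_replicate]
    have := pv_outer (board.foldl (fun acc row => max acc row.toList.length) 0) board []
      (fun row hr => pv_le_foldl_max board row hr 0)
    simpa [List.map_const'] using this
  -- B's side: the loop yields the same padded-row map
  have hB : mk_grid_alt board = board.map (fun row =>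
      row.toList.map (fun c => String.ofList [c]) ++
        List.replicate ((board.foldl (fun acc row => max acc row.toList.length) 0) - row.toList.length) " ") := by
    unfold mk_grid_alt
    rw [pv_loop board (board.foldl (fun acc row => max acc row.toList.length) 0) 0
      (board.map (fun _ => ([] : List String))) (by omega) (by simp)]
    rw [pv_zipWith_map_nil]
    refine List.map_congr_left (fun row _ => ?_)
    simp [pvPad]
  rw [hA, hB]
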